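-- pv_equiv track=rewrite | github.com/hagud/ccolectivo | colectivo_v6_mini.py | is_valid_issn
-- ===== SOURCE A (Python) =====
-- def is_valid_issn(d: str) -> bool:
--     if len(d) == 7:
--         d = "0" + d
--     if len(d) != 8:
--         return False
--     try:
--         tot = sum((8 - i) * int(ch) for i, ch in enumerate(d[:7]))
--         chk = (11 - (tot % 11)) % 11
--         return ("X" if chk == 10 else str(chk)) == d[7]
--     except:
--         return False
-- ===== SOURCE B (Python) =====
-- def is_valid_issn(d: str) -> bool:
--     if len(d) == 7:
--         d = "0" + d
--     if len(d) != 8: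
--         return False
--     total = 0
--     for i, ch in enumerate(d):
--         if i == 7 and ch == "X":
--             total += 10
--         elif "0" <= ch <= "9":
--             total += (8 - i) * (ord(ch) - 48)
--         else:
--             return False
--     return total % 11 == 0
-- ===== Notes on version B (the rewrite author's own statement) =====
-- stated objective: simpler
-- what changed: B drops the check-digit construction and the try/except entirely: it makes one early-exit pass over all 8 characters accumulating the full ISSN weighted sum (the last position contributing ten for the check character and its digit value otherwise) and tests divisibility of the total by 11.
import Mathlib
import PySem

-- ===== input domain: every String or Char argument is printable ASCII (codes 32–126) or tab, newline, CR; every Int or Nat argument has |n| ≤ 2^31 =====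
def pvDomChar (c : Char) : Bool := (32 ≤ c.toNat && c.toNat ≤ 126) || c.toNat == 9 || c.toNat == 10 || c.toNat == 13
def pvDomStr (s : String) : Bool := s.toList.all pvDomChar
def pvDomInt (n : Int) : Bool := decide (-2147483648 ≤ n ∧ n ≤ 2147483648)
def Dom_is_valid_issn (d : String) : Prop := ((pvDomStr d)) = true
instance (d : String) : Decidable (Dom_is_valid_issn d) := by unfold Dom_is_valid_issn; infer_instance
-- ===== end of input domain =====

-- B recomputes the full weighted sum over all 8 characters in one pass (no try/except,
-- no check-digit construction); same return value on the printable-ASCII domain; objective: idiomatic/simpler.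

-- B replaces A's check-digit construction and try/except with one early-exit pass
-- computing the full weighted sum over all 8 characters; same value on the stated domain; objective: simpler.

-- ===== PORT A =====
-- literal transliteration of A: pad to 8, length guard, try-sum over the first 7 via int(ch)
-- (none = the caught ValueError), check digit compared with d[7]
def isValidIssnGoA (cs : List Char) : Bool :=
  let cs := if cs.length == 7 then '0' :: cs else cs
  if cs.length != 8 then false
  else
    let tot? := (PySem.List.enumerate (PySem.List.slice cs none (some 7))).foldl
      (fun acc p =>
        match acc, PySem.Int.ofChars? [p.2] with
        | some a, some v => some (a + (8 - p.1) * v)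
        | _, _ => none) (some (0 : Int))
    match tot?, PySem.List.pyGet? cs 7 with
    | some tot, some c7 =>
        let chk := PySem.Int.mod (11 - PySem.Int.mod tot 11) 11
        (if chk == 10 then ['X'] else PySem.Int.toChars chk) == [c7]
    | _, _ => false

def is_valid_issn (d : String) : Bool := isValidIssnGoA d.toList

-- ===== PORT B =====
-- B's single pass with early return: none = the 'return False' branch
def isValidIssnScan : List (Int × Char) → Int → Option Int
  | [], total => some total
  | (i, ch) :: rest, total =>
    if i == 7 && ch == 'X' then isValidIssnScan rest (total + 10)
    else if '0' ≤ ch ∧ ch ≤ '9' then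
      isValidIssnScan rest (total + (8 - i) * ((ch.toNat : Int) - 48))
    else none

def isValidIssnGoB (cs : List Char) : Bool :=
  let cs := if cs.length == 7 then '0' :: cs else cs
  if cs.length != 8 then false
  else
    match isValidIssnScan (PySem.List.enumerate cs) 0 with
    | some total => PySem.Int.mod total 11 == 0
    | none => false

def is_valid_issn_alt (d : String) : Bool := isValidIssnGoB d.toList

-- ===== PRECONDITION & SPEC =====
def Spec_is_valid_issn (d : String) (out : Bool) : Prop := out = is_valid_issn_alt d
instance (d : String) (out : Bool) : Decidable (Spec_is_valid_issn d out) := by unfold Spec_is_valid_issn; infer_instance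

-- ===== CLAIM (what is proved, stated in full; the proofs are below) =====
def Claim_equal_is_valid_issn : Prop := ∀ (d : String), Dom_is_valid_issn d → Spec_is_valid_issn d (is_valid_issn d)

-- ===== LEMMAS AND PROOFS =====

lemma pvOfCharsSingle (c : Char) (h : pvDomChar c = true) :
    PySem.Int.ofChars? [c] =
      (if '0' ≤ c ∧ c ≤ '9' then some ((c.toNat : Int) - 48) else none) := by
  have hb : c.toNat < 127 := by simp [pvDomChar] at h; omega
  obtain ⟨n, hn, rfl⟩ : ∃ n, n < 127 ∧ Char.ofNat n = c := ⟨c.toNat, hb, Char.ofNat_toNat c⟩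
  revert h
  interval_cases n <;> decide

lemma pvCharFacts (c : Char) (hdom : pvDomChar c = true) :
    ((c = 'X') ↔ c.toNat = 88) ∧ (('0' ≤ c ∧ c ≤ '9') ↔ (48 ≤ c.toNat ∧ c.toNat ≤ 57)) ∧
    (∀ k : Nat, k < 10 → ((PySem.Int.toChars (k : Int) == [c]) = decide (c.toNat = k + 48))) := by
  have hb : c.toNat < 127 := by simp [pvDomChar] at hdom; omega
  obtain ⟨n, hn, rfl⟩ : ∃ n, n < 127 ∧ Char.ofNat n = c := ⟨c.toNat, hb, Char.ofNat_toNat c⟩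
  revert hdom
  interval_cases n <;> decide

lemma pvLast (T : Int) (h : Char) (hh : pvDomChar h = true) :
    ((if -(T % 11) % 11 = 10 then ['X'] else PySem.Int.toChars (-(T % 11) % 11)) == [h]) =
    (if h = 'X' then ((T + 10) % 11 == 0)
     else if '0' ≤ h ∧ h ≤ '9' then ((T + (↑h.toNat - 48)) % 11 == 0)
     else false) := by
  obtain ⟨hX, hdig, hk⟩ := pvCharFacts h hh
  obtain ⟨r, hr0, hr1, hrdef⟩ : ∃ r : Int, 0 ≤ r ∧ r < 11 ∧ -(T % 11) % 11 = r :=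
    ⟨_, Int.emod_nonneg _ (by norm_num), Int.emod_lt_of_pos _ (by norm_num), rfl⟩
  rw [hrdef]
  obtain ⟨k, rfl⟩ : ∃ k : Nat, (k : Int) = r := ⟨r.toNat, by omega⟩
  have hk11 : k < 11 := by omega
  have hXn : ('X' : Char).toNat = 88 := rfl
  split_ifs with h10 hX' hdig' hX' hdig'
  · subst hX'
    simp
    omega
  · have hne : ('X' : Char) ≠ h := fun e => hX' e.symm
    obtain ⟨hb1, hb2⟩ := hdig.mp hdig'
    simp [hne]
    omega
  · have hne : ('X' : Char) ≠ h := fun e => hX' e.symm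
    simp [hne]
  · subst hX'
    rw [hk k (by omega)]
    have hx1 : k ≠ 40 := by omega
    have hx2 : (T + 10) % 11 ≠ 0 := by omega
    simp [hx1, hx2]
  · rw [hk k (by omega)]
    obtain ⟨hb1, hb2⟩ := hdig.mp hdig'
    by_cases heq : h.toNat = k + 48
    · have hx : (T + (↑h.toNat - 48)) % 11 = 0 := by omega
      simp [heq]
      omega
    · have hx : (T + (↑h.toNat - 48)) % 11 ≠ 0 := by omega
      simp [heq]
      omega
  · rw [hk k (by omega)]
    have hnd := (not_congr hdig).mp hdig'
    have hx : h.toNat ≠ k + 48 := by omega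
    simp [hx]

lemma pvCore (a b c d e f g h : Char)
    (ha : pvDomChar a = true) (hb : pvDomChar b = true) (hc : pvDomChar c = true)
    (hd : pvDomChar d = true) (he : pvDomChar e = true) (hf : pvDomChar f = true)
    (hg : pvDomChar g = true) (hh : pvDomChar h = true) :
    isValidIssnGoA [a, b, c, d, e, f, g, h] = isValidIssnGoB [a, b, c, d, e, f, g, h] := by
  simp only [isValidIssnGoA, isValidIssnGoB]
  simp [PySem.List.slice, PySem.List.clampIdx, PySem.List.enumerate, isValidIssnScan,
    pvOfCharsSingle a ha, pvOfCharsSingle b hb, pvOfCharsSingle c hc, pvOfCharsSingle d hd,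
    pvOfCharsSingle e he, pvOfCharsSingle f hf, pvOfCharsSingle g hg]
  by_cases h1 : '0' ≤ a ∧ a ≤ '9'
  case neg => simp [h1]
  by_cases h2 : '0' ≤ b ∧ b ≤ '9'
  case neg => simp [h1, h2]
  by_cases h3 : '0' ≤ c ∧ c ≤ '9'
  case neg => simp [h1, h2, h3]
  by_cases h4 : '0' ≤ d ∧ d ≤ '9'
  case neg => simp [h1, h2, h3, h4]
  by_cases h5 : '0' ≤ e ∧ e ≤ '9'
  case neg => simp [h1, h2, h3, h4, h5]
  by_cases h6 : '0' ≤ f ∧ f ≤ '9'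
  case neg => simp [h1, h2, h3, h4, h5, h6]
  by_cases h7 : '0' ≤ g ∧ g ≤ '9'
  case neg => simp [h1, h2, h3, h4, h5, h6, h7]
  simp [h1, h2, h3, h4, h5, h6, h7]
  rw [pvLast _ h hh]
  split_ifs <;> simp

lemma pvGoEq (cs : List Char) (hdom : cs.all pvDomChar = true) :
    isValidIssnGoA cs = isValidIssnGoB cs := by
  rcases cs with _ | ⟨a, _ | ⟨b, _ | ⟨c, _ | ⟨d, _ | ⟨e, _ | ⟨f, _ | ⟨g, _ | ⟨h, _ | ⟨i, t⟩⟩⟩⟩⟩⟩⟩⟩⟩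
  · simp [isValidIssnGoA, isValidIssnGoB]
  · simp [isValidIssnGoA, isValidIssnGoB]
  · simp [isValidIssnGoA, isValidIssnGoB]
  · simp [isValidIssnGoA, isValidIssnGoB]
  · simp [isValidIssnGoA, isValidIssnGoB]
  · simp [isValidIssnGoA, isValidIssnGoB]
  · simp [isValidIssnGoA, isValidIssnGoB]
  · -- length 7: both ports prepend '0' and continue on the 8-character list
    simp only [List.all_cons, Bool.and_eq_true] at hdom
    have eA : isValidIssnGoA [a, b, c, d, e, f, g] = isValidIssnGoA ['0', a, b, c, d, e, f, g] := by
      simp [isValidIssnGoA]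
    have eB : isValidIssnGoB [a, b, c, d, e, f, g] = isValidIssnGoB ['0', a, b, c, d, e, f, g] := by
      simp [isValidIssnGoB]
    rw [eA, eB]
    exact pvCore '0' a b c d e f g (by decide) hdom.1 hdom.2.1 hdom.2.2.1 hdom.2.2.2.1
      hdom.2.2.2.2.1 hdom.2.2.2.2.2.1 hdom.2.2.2.2.2.2.1
  · simp only [List.all_cons, Bool.and_eq_true] at hdom
    exact pvCore a b c d e f g h hdom.1 hdom.2.1 hdom.2.2.1 hdom.2.2.2.1 hdom.2.2.2.2.1
      hdom.2.2.2.2.2.1 hdom.2.2.2.2.2.2.1 hdom.2.2.2.2.2.2.2.1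
  · -- length ≥ 9: both ports return false
    simp [isValidIssnGoA, isValidIssnGoB]

-- ===== VERDICT (by name: the statement is the Claim_ definition above) =====
theorem is_valid_issn_spec : Claim_equal_is_valid_issn := by
  intro d hdom
  unfold Spec_is_valid_issn is_valid_issn is_valid_issn_alt
  exact pvGoEq d.toList hdom
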